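-- pv_equiv track=rewrite | github.com/allenhyp/LeetCodePractice | TuSimple_N_People_To_K_Groups.py | NPeopleToKGroups
-- ===== SOURCE A (Python) =====
-- def NPeopleToKGroups(n, k):
--     if n < k:
--         return 0
--     dp = [[0] * (n + 1) for _ in range(k + 1)]
--     for i in range(1, k + 1):
--         for j in range(i, n + 1):
--             if i == j:
--                 dp[i][j] = 1
--             else:
--                 dp[i][j] = dp[i - 1][j - 1] + dp[i][j - i]
--     return dp[k][n]
-- ===== SOURCE B (Python) =====
-- def NPeopleToKGroups(n, k):
--     # Counts partitions of n into exactly k groups via the identity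
--     # p_exactly_k(n) = p_parts_at_most_k(n - k): a 1-D knapsack over
--     # part sizes 1..k on the remainder m = n - k.
--     if n < k or k <= 0:
--         return 0
--     m = n - k
--     dp = [1] + [0] * m
--     for p in range(1, k + 1):
--         for j in range(p, m + 1):
--             dp[j] += dp[j - p]
--     return dp[m]
-- ===== Notes on version B (the rewrite author's own statement) =====
-- stated objective: alternative
-- what changed: Replaces the 2-D exactly-k-parts table with a 1-D bounded-part-size knapsack over the remainder n-k, using the identity p_k(n) = p_{parts<=k}(n-k).
import Mathlib
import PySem

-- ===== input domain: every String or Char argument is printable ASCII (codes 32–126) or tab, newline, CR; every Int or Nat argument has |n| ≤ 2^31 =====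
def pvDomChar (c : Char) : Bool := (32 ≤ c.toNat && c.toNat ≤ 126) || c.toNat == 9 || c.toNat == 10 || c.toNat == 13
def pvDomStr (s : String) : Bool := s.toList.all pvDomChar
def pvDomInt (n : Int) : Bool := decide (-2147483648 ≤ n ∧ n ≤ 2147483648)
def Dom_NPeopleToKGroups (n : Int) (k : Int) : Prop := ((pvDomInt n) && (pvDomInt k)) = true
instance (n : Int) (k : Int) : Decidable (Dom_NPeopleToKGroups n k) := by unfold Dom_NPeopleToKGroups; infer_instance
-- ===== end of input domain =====

-- B counts partitions of n into exactly k groups by a 1-D bounded-part-size knapsack on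
-- the remainder n-k (identity p_k(n) = p_{parts ≤ k}(n-k)) instead of A's 2-D table;
-- objective: alternative algorithm of the same cost.

-- ===== PORT A =====
-- Python list reads/writes xs[j] (exact here: A's loops only use indices with
-- 0 ≤ j < len(xs), where Python indexing and these helpers agree).
def pvRowGet (xs : List Int) (j : Int) : Int := (xs[j.toNat]?).getD 0
def pvRowSet (xs : List Int) (j v : Int) : List Int := xs.set j.toNat v
def pvGet2 (dp : List (List Int)) (i j : Int) : Int := pvRowGet ((dp[i.toNat]?).getD []) j
def pvSet2 (dp : List (List Int)) (i j v : Int) : List (List Int) :=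
  dp.set i.toNat (pvRowSet ((dp[i.toNat]?).getD []) j v)

def NPeopleToKGroups (n : Int) (k : Int) : Int :=
  if n < k then 0
  else
    let dp0 : List (List Int) :=
      (PySem.List.pyRange 0 (k+1) 1).map (fun _ => List.replicate (n+1).toNat 0)
    let dp := (PySem.List.pyRange 1 (k+1) 1).foldl (fun dp i =>
      (PySem.List.pyRange i (n+1) 1).foldl (fun dp j =>
        if i = j then pvSet2 dp i j 1
        else pvSet2 dp i j (pvGet2 dp (i-1) (j-1) + pvGet2 dp i (j - i))) dp) dp0
    pvGet2 dp k n

-- ===== PORT B =====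
def NPeopleToKGroups_alt (n : Int) (k : Int) : Int :=
  if n < k ∨ k ≤ 0 then 0
  else
    let m := n - k
    let dp0 : List Int := 1 :: List.replicate m.toNat 0
    let dp := (PySem.List.pyRange 1 (k+1) 1).foldl (fun dp p =>
      (PySem.List.pyRange p (m+1) 1).foldl (fun dp j =>
        pvRowSet dp j (pvRowGet dp j + pvRowGet dp (j - p))) dp) dp0
    pvRowGet dp m

-- ===== PRECONDITION & SPEC =====
-- Pre_ excludes exactly the inputs where A raises IndexError: k < 0 together with n ≥ k
-- (dp is then an empty list and dp[k] fails); B returns 0 there.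
def Pre_NPeopleToKGroups (n : Int) (k : Int) : Prop := n < k ∨ 0 ≤ k
instance (n : Int) (k : Int) : Decidable (Pre_NPeopleToKGroups n k) := by unfold Pre_NPeopleToKGroups; infer_instance
def pvWitness_NPeopleToKGroups : Int × Int := (7, 3)

def Spec_NPeopleToKGroups (n : Int) (k : Int) (out : Int) : Prop := out = NPeopleToKGroups_alt n k
instance (n : Int) (k : Int) (out : Int) : Decidable (Spec_NPeopleToKGroups n k out) := by unfold Spec_NPeopleToKGroups; infer_instance

-- ===== CLAIM (what is proved, stated in full; the proofs are below) =====
def Claim_equal_NPeopleToKGroups : Prop := ∀ (n : Int) (k : Int), Dom_NPeopleToKGroups n k → Pre_NPeopleToKGroups n k → Spec_NPeopleToKGroups n k (NPeopleToKGroups n k)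

-- ===== LEMMAS AND PROOFS =====

-- number of partitions of j into exactly i parts (A's table recurrence)
def pvT (i j : Int) : Int :=
  if i ≤ 0 ∨ j < i then 0
  else if j = i then 1
  else pvT (i-1) (j-1) + pvT i (j - i)
termination_by (i + j).toNat
decreasing_by all_goals omega

-- number of partitions of j into parts of size ≤ p (B's knapsack recurrence)
def pvQ (p j : Int) : Int :=
  if j < 0 then 0
  else if p ≤ 0 then (if j = 0 then 1 else 0)
  else pvQ (p-1) j + (if _h : p ≤ j then pvQ p (j - p) else 0)
termination_by (p + j).toNat
decreasing_by all_goals omega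

theorem pvT_out (i j : Int) (h : i ≤ 0 ∨ j < i) : pvT i j = 0 := by
  rw [pvT, if_pos h]

theorem pvT_diag (i : Int) (h : 1 ≤ i) : pvT i i = 1 := by
  rw [pvT, if_neg (by omega), if_pos rfl]

theorem pvT_rec (i j : Int) (h1 : 1 ≤ i) (h2 : i < j) :
    pvT i j = pvT (i-1) (j-1) + pvT i (j - i) := by
  rw [pvT, if_neg (by omega), if_neg (by omega)]

theorem pvQ_neg (p j : Int) (h : j < 0) : pvQ p j = 0 := by
  rw [pvQ, if_pos h]

theorem pvQ_lt (p j : Int) (hp : 1 ≤ p) (hj : j < p) : pvQ p j = pvQ (p-1) j := by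
  by_cases h0 : j < 0
  · rw [pvQ_neg p j h0, pvQ_neg (p-1) j h0]
  · rw [pvQ, if_neg h0, if_neg (by omega : ¬ p ≤ 0), dif_neg (by omega : ¬ p ≤ j), add_zero]

theorem pvQ_rec (p j : Int) (hp : 1 ≤ p) (hj : p ≤ j) :
    pvQ p j = pvQ (p-1) j + pvQ p (j - p) := by
  rw [pvQ, if_neg (by omega : ¬ j < 0), if_neg (by omega : ¬ p ≤ 0), dif_pos hj]

theorem pvQ_zero_aux : ∀ (N : ℕ) (p : Int), 0 ≤ p → p.toNat ≤ N → pvQ p 0 = 1 := by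
  intro N
  induction N with
  | zero =>
    intro p h1 h2
    have : p = 0 := by omega
    subst this
    rw [pvQ, if_neg (by omega), if_pos (by omega), if_pos rfl]
  | succ N ih =>
    intro p h1 h2
    by_cases h : p = 0
    · subst h; rw [pvQ, if_neg (by omega), if_pos (by omega), if_pos rfl]
    · rw [pvQ, if_neg (by omega), if_neg (by omega), dif_neg (by omega), add_zero]
      exact ih (p-1) (by omega) (by omega)

theorem pvQ_zero (p : Int) (h : 0 ≤ p) : pvQ p 0 = 1 :=
  pvQ_zero_aux p.toNat p h (le_refl _)

theorem pvQ_zero_arg (j : Int) (h : 1 ≤ j) : pvQ 0 j = 0 := by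
  rw [pvQ, if_neg (by omega), if_pos (by omega), if_neg (by omega)]

theorem pvQ_rec' (p j : Int) (hp : 1 ≤ p) (hj : 0 ≤ j) :
    pvQ p j = pvQ (p-1) j + (if p ≤ j then pvQ p (j - p) else 0) := by
  rw [pvQ, if_neg (by omega : ¬ j < 0), if_neg (by omega : ¬ p ≤ 0)]
  by_cases h : p ≤ j
  · rw [dif_pos h, if_pos h]
  · rw [dif_neg h, if_neg h]

-- the key identity: exactly-i partitions of j = parts-≤-i partitions of j - i
theorem pvT_eq_pvQ_aux : ∀ (N : ℕ) (i j : Int), 1 ≤ i → i ≤ j → (i + j).toNat ≤ N →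
    pvT i j = pvQ i (j - i) := by
  intro N
  induction N with
  | zero => intro i j h1 h2 h3; omega
  | succ N ih =>
    intro i j h1 h2 h3
    by_cases hd : j = i
    · rw [hd, pvT_diag i h1, sub_self, pvQ_zero i (by omega)]
    · have hlt : i < j := by omega
      rw [pvT_rec i j h1 hlt, pvQ_rec' i (j - i) h1 (by omega)]
      congr 1
      · by_cases hi1 : i = 1
        · rw [pvT_out (i-1) (j-1) (Or.inl (by omega)), hi1]
          norm_num
          rw [pvQ_zero_arg (j-1) (by omega)]
        · have h := ih (i-1) (j-1) (by omega) (by omega) (by omega)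
          rw [h]
          have : j - 1 - (i - 1) = j - i := by ring
          rw [this]
      · by_cases h : i ≤ j - i
        · rw [if_pos h]
          exact ih i (j - i) h1 h (by omega)
        · rw [if_neg h, pvT_out i (j - i) (Or.inr (by omega))]

-- ---- helper lemmas about the list reads/writes ----
theorem pvRowGet_set (xs : List Int) (j b v : Int) (hj : 0 ≤ j) (hjl : j.toNat < xs.length)
    (hb : 0 ≤ b) :
    pvRowGet (pvRowSet xs j v) b = if b = j then v else pvRowGet xs b := by
  unfold pvRowGet pvRowSet
  by_cases hbj : b = j
  · rw [if_pos hbj, hbj, List.getElem?_set_self (by omega), Option.getD_some]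
  · rw [if_neg hbj, List.getElem?_set_ne (by omega)]

theorem pvRowSet_length (xs : List Int) (j v : Int) : (pvRowSet xs j v).length = xs.length := by
  unfold pvRowSet
  exact List.length_set ..

theorem pvSet2_length (dp : List (List Int)) (i j v : Int) :
    (pvSet2 dp i j v).length = dp.length := by
  unfold pvSet2
  exact List.length_set ..

theorem pvSet2_rows (dp : List (List Int)) (i j v : Int) (L : ℕ)
    (hrows : ∀ row ∈ dp, row.length = L) (hi : i.toNat < dp.length) :
    ∀ row ∈ pvSet2 dp i j v, row.length = L := by
  intro row hrow
  unfold pvSet2 at hrow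
  rcases List.mem_or_eq_of_mem_set hrow with h | h
  · exact hrows row h
  · rw [h, pvRowSet_length, List.getElem?_eq_getElem hi, Option.getD_some]
    exact hrows _ (List.getElem_mem hi)

theorem pvGet2_set2 (dp : List (List Int)) (i j a b v : Int) (L : ℕ)
    (hrows : ∀ row ∈ dp, row.length = L)
    (hi : 0 ≤ i) (hil : i.toNat < dp.length) (hj : 0 ≤ j) (hjl : j.toNat < L)
    (ha : 0 ≤ a) (hb : 0 ≤ b) :
    pvGet2 (pvSet2 dp i j v) a b = if a = i ∧ b = j then v else pvGet2 dp a b := by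
  have hrowlen : ((dp[i.toNat]?).getD []).length = L := by
    rw [List.getElem?_eq_getElem hil, Option.getD_some]
    exact hrows _ (List.getElem_mem hil)
  by_cases hai : a = i
  · have hrw : pvGet2 (pvSet2 dp i j v) a b
        = pvRowGet (pvRowSet ((dp[i.toNat]?).getD []) j v) b := by
      unfold pvGet2 pvSet2
      rw [hai, List.getElem?_set_self (by omega), Option.getD_some]
    rw [hrw, pvRowGet_set _ j b v hj (by omega) hb]
    by_cases hbj : b = j
    · rw [if_pos hbj, if_pos ⟨hai, hbj⟩]
    · rw [if_neg hbj, if_neg (by tauto)]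
      unfold pvGet2
      rw [hai]
  · have hrw : pvGet2 (pvSet2 dp i j v) a b = pvGet2 dp a b := by
      unfold pvGet2 pvSet2
      rw [List.getElem?_set_ne (by omega)]
    rw [hrw, if_neg (by tauto)]

-- ---- loop invariant for port A ----
def pvRowA (n k i t : Int) (dp : List (List Int)) : Prop :=
  dp.length = (k+1).toNat ∧ (∀ row ∈ dp, row.length = (n+1).toNat) ∧
  ∀ a b : Int, 0 ≤ a → a ≤ k → 0 ≤ b → b ≤ n →
    pvGet2 dp a b = if (1 ≤ a ∧ a < i ∧ a ≤ b ∧ b ≤ n) ∨ (a = i ∧ i ≤ b ∧ b < t) then pvT a b else 0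

theorem pvInnerA (n k i : Int) (hi : 1 ≤ i) (hik : i ≤ k) (hkn : k ≤ n) :
    ∀ (N : ℕ) (t : Int) (dp : List (List Int)), i ≤ t → t ≤ n + 1 → (n + 1 - t).toNat ≤ N →
    pvRowA n k i t dp →
    pvRowA n k i (n+1) ((PySem.List.pyRange t (n+1) 1).foldl
      (fun dp j =>
        if i = j then pvSet2 dp i j 1
        else pvSet2 dp i j (pvGet2 dp (i-1) (j-1) + pvGet2 dp i (j - i))) dp) := by
  intro N
  induction N with
  | zero =>
    intro t dp ht ht2 hN hInv
    have : t = n + 1 := by omega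
    subst this
    rw [PySem.List.pyRange_one_eq_nil (by omega), List.foldl_nil]
    exact hInv
  | succ N ih =>
    intro t dp ht ht2 hN hInv
    by_cases htop : n + 1 ≤ t
    · have : t = n + 1 := by omega
      subst this
      rw [PySem.List.pyRange_one_eq_nil (by omega), List.foldl_nil]
      exact hInv
    · rw [PySem.List.pyRange_one_cons (by omega : t < n + 1), List.foldl_cons]
      obtain ⟨hlen, hrows, hInv⟩ := hInv
      have hil : i.toNat < dp.length := by rw [hlen]; omega
      have htl : t.toNat < (n+1).toNat := by omega
      apply ih (t+1) _ (by omega) (by omega) (by omega)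
      -- the one-step update preserves the row invariant
      refine ⟨?_, ?_, ?_⟩
      · by_cases hit : i = t
        · rw [if_pos hit, pvSet2_length, hlen]
        · rw [if_neg hit, pvSet2_length, hlen]
      · by_cases hit : i = t
        · rw [if_pos hit]; exact pvSet2_rows dp i t 1 _ hrows hil
        · rw [if_neg hit]; exact pvSet2_rows dp i t _ _ hrows hil
      · intro a b ha hak hb hbn
        have hset : ∀ v, pvGet2 (pvSet2 dp i t v) a b
            = if a = i ∧ b = t then v else pvGet2 dp a b := fun v =>
          pvGet2_set2 dp i t a b v (n+1).toNat hrows (by omega) hil (by omega) htl ha hb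
        by_cases hab : a = i ∧ b = t
        · obtain ⟨ha2, hb2⟩ := hab
          rw [if_pos (Or.inr ⟨ha2, by omega, by omega⟩)]
          by_cases hit : i = t
          · rw [if_pos hit, hset 1, if_pos ⟨ha2, hb2⟩, ha2, hb2, ← hit, pvT_diag i hi]
          · rw [if_neg hit, hset _, if_pos ⟨ha2, hb2⟩, ha2, hb2]
            have h1 : pvGet2 dp (i-1) (t-1) = pvT (i-1) (t-1) := by
              rw [hInv (i-1) (t-1) (by omega) (by omega) (by omega) (by omega)]
              by_cases h2 : 2 ≤ i
              · rw [if_pos (Or.inl ⟨by omega, by omega, by omega, by omega⟩)]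
              · rw [if_neg (by omega), pvT_out (i-1) (t-1) (Or.inl (by omega))]
            have h3 : pvGet2 dp i (t-i) = pvT i (t-i) := by
              rw [hInv i (t-i) (by omega) (by omega) (by omega) (by omega)]
              by_cases h4 : i ≤ t - i
              · rw [if_pos (Or.inr ⟨rfl, h4, by omega⟩)]
              · rw [if_neg (by omega), pvT_out i (t-i) (Or.inr (by omega))]
            rw [h1, h3, pvT_rec i t hi (by omega)]
        · have hstep : pvGet2 (if i = t then pvSet2 dp i t 1
              else pvSet2 dp i t (pvGet2 dp (i-1) (t-1) + pvGet2 dp i (t - i))) a b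
              = pvGet2 dp a b := by
            by_cases hit : i = t
            · rw [if_pos hit, hset 1, if_neg hab]
            · rw [if_neg hit, hset _, if_neg hab]
          rw [hstep, hInv a b ha hak hb hbn]
          split_ifs with h1 h2 <;> first | rfl | (exfalso; omega)

theorem pvGet2_init (n k a b : Int) :
    pvGet2 ((PySem.List.pyRange 0 (k+1) 1).map (fun _ => List.replicate (n+1).toNat 0)) a b
      = 0 := by
  unfold pvGet2 pvRowGet
  rcases h : ((PySem.List.pyRange 0 (k+1) 1).map (fun _ => List.replicate (n+1).toNat 0))[a.toNat]? with _ | row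
  · rfl
  · have hmem : row ∈ (PySem.List.pyRange 0 (k+1) 1).map (fun _ => List.replicate (n+1).toNat 0) :=
      List.mem_of_getElem? h
    obtain ⟨x, _, hrow⟩ := List.mem_map.mp hmem
    rw [Option.getD_some, ← hrow, List.getElem?_replicate]
    split_ifs <;> rfl

theorem pvOuterA (n k : Int) (hkn : k ≤ n) :
    ∀ (N : ℕ) (i : Int) (dp : List (List Int)), 1 ≤ i → i ≤ k + 1 → (k + 1 - i).toNat ≤ N →
    pvRowA n k i i dp →
    pvRowA n k (k+1) (k+1) ((PySem.List.pyRange i (k+1) 1).foldl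
      (fun dp i =>
        (PySem.List.pyRange i (n+1) 1).foldl
          (fun dp j =>
            if i = j then pvSet2 dp i j 1
            else pvSet2 dp i j (pvGet2 dp (i-1) (j-1) + pvGet2 dp i (j - i))) dp) dp) := by
  intro N
  induction N with
  | zero =>
    intro i dp h1 h2 hN hInv
    have : i = k + 1 := by omega
    subst this
    rw [PySem.List.pyRange_one_eq_nil (by omega), List.foldl_nil]
    exact hInv
  | succ N ih =>
    intro i dp h1 h2 hN hInv
    by_cases htop : k + 1 ≤ i
    · have : i = k + 1 := by omega
      subst this
      rw [PySem.List.pyRange_one_eq_nil (by omega), List.foldl_nil]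
      exact hInv
    · rw [PySem.List.pyRange_one_cons (by omega : i < k + 1), List.foldl_cons]
      apply ih (i+1) _ (by omega) (by omega) (by omega)
      obtain ⟨hlen, hrows, hrow⟩ :=
        pvInnerA n k i h1 (by omega) hkn (n + 1 - i).toNat i dp (le_refl i) (by omega)
          (le_refl _) hInv
      refine ⟨hlen, hrows, ?_⟩
      intro a b ha hak hb hbn
      rw [hrow a b ha hak hb hbn]
      split_ifs with hc1 hc2 <;> first | rfl | (exfalso; omega)

-- ---- loop invariant for port B ----
def pvRowB (m p t : Int) (dp : List Int) : Prop :=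
  dp.length = (m+1).toNat ∧
  ∀ b : Int, 0 ≤ b → b ≤ m → pvRowGet dp b = if p ≤ b ∧ b < t then pvQ p b else pvQ (p-1) b

theorem pvInnerB (m p : Int) (hp : 1 ≤ p) (hm : 0 ≤ m) :
    ∀ (N : ℕ) (t : Int) (dp : List Int), p ≤ t → (m + 1 - t).toNat ≤ N →
    pvRowB m p t dp →
    pvRowB m p (m+1) ((PySem.List.pyRange t (m+1) 1).foldl
      (fun dp j => pvRowSet dp j (pvRowGet dp j + pvRowGet dp (j - p))) dp) := by
  intro N
  induction N with
  | zero =>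
    intro t dp ht hN hInv
    rw [PySem.List.pyRange_one_eq_nil (by omega : m + 1 ≤ t), List.foldl_nil]
    obtain ⟨hlen, hInv⟩ := hInv
    refine ⟨hlen, ?_⟩
    intro b hb0 hbm
    rw [hInv b hb0 hbm]
    split_ifs with h1 h2 <;> first | rfl | (exfalso; omega)
  | succ N ih =>
    intro t dp ht hN hInv
    by_cases htop : m + 1 ≤ t
    · rw [PySem.List.pyRange_one_eq_nil htop, List.foldl_nil]
      obtain ⟨hlen, hInv⟩ := hInv
      refine ⟨hlen, ?_⟩
      intro b hb0 hbm
      rw [hInv b hb0 hbm]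
      split_ifs with h1 h2 <;> first | rfl | (exfalso; omega)
    · rw [PySem.List.pyRange_one_cons (by omega : t < m + 1), List.foldl_cons]
      obtain ⟨hlen, hInv⟩ := hInv
      have htl : t.toNat < dp.length := by rw [hlen]; omega
      apply ih (t+1) _ (by omega) (by omega)
      refine ⟨by rw [pvRowSet_length, hlen], ?_⟩
      intro b hb0 hbm
      rw [pvRowGet_set dp t b _ (by omega) htl hb0]
      by_cases hbt : b = t
      · rw [if_pos hbt, hbt, if_pos ⟨ht, by omega⟩]
        have h1 : pvRowGet dp t = pvQ (p-1) t := by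
          rw [hInv t (by omega) (by omega), if_neg (by omega)]
        have h2 : pvRowGet dp (t - p) = pvQ p (t - p) := by
          rw [hInv (t - p) (by omega) (by omega)]
          by_cases h3 : p ≤ t - p
          · rw [if_pos ⟨h3, by omega⟩]
          · rw [if_neg (by omega), pvQ_lt p (t - p) hp (by omega)]
        rw [h1, h2, pvQ_rec p t hp ht]
      · rw [if_neg hbt, hInv b hb0 hbm]
        split_ifs with h1 h2 <;> first | rfl | (exfalso; omega)

theorem pvOuterB (m k : Int) (hm : 0 ≤ m) :
    ∀ (N : ℕ) (p : Int) (dp : List Int), 1 ≤ p → p ≤ k + 1 → (k + 1 - p).toNat ≤ N →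
    pvRowB m p p dp →
    pvRowB m (k+1) (k+1) ((PySem.List.pyRange p (k+1) 1).foldl
      (fun dp p =>
        (PySem.List.pyRange p (m+1) 1).foldl
          (fun dp j => pvRowSet dp j (pvRowGet dp j + pvRowGet dp (j - p))) dp) dp) := by
  intro N
  induction N with
  | zero =>
    intro p dp h1 h2 hN hInv
    have : p = k + 1 := by omega
    subst this
    rw [PySem.List.pyRange_one_eq_nil (by omega), List.foldl_nil]
    exact hInv
  | succ N ih =>
    intro p dp h1 h2 hN hInv
    by_cases htop : k + 1 ≤ p
    · have : p = k + 1 := by omega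
      subst this
      rw [PySem.List.pyRange_one_eq_nil (by omega), List.foldl_nil]
      exact hInv
    · rw [PySem.List.pyRange_one_cons (by omega : p < k + 1), List.foldl_cons]
      apply ih (p+1) _ (by omega) (by omega) (by omega)
      obtain ⟨hlen, hrow⟩ :=
        pvInnerB m p h1 hm (m + 1 - p).toNat p dp (le_refl p) (le_refl _) hInv
      refine ⟨hlen, ?_⟩
      intro b hb0 hbm
      rw [hrow b hb0 hbm]
      have e : p + 1 - 1 = p := by ring
      by_cases hc : p ≤ b
      · rw [if_pos ⟨hc, by omega⟩, if_neg (by omega), e]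
      · rw [if_neg (by omega), if_neg (by omega), e, pvQ_lt p b h1 (by omega)]

-- ---- characterisations of the two ports on the nontrivial branch ----
theorem pvA_eq (n k : Int) (h1 : 1 ≤ k) (h2 : k ≤ n) : NPeopleToKGroups n k = pvT k n := by
  unfold NPeopleToKGroups
  rw [if_neg (by omega : ¬ n < k)]
  have hinit : pvRowA n k 1 1
      ((PySem.List.pyRange 0 (k+1) 1).map (fun _ => List.replicate (n+1).toNat 0)) := by
    refine ⟨?_, ?_, ?_⟩
    · rw [List.length_map, PySem.List.length_pyRange_one]
      omega
    · intro row hrow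
      obtain ⟨x, _, hx⟩ := List.mem_map.mp hrow
      rw [← hx, List.length_replicate]
    · intro a b _ _ _ _
      rw [pvGet2_init n k a b, if_neg (by omega)]
  obtain ⟨-, -, h3⟩ := pvOuterA n k h2 (k + 1 - 1).toNat 1 _ (by omega) (by omega)
    (by omega) hinit
  have hfin := h3 k n (by omega) (le_refl k) (by omega) (le_refl n)
  rw [if_pos (Or.inl ⟨h1, by omega, h2, le_refl n⟩)] at hfin
  exact hfin

theorem pvRowGet_initB (m b : Int) (hb0 : 0 ≤ b) :
    pvRowGet (1 :: List.replicate m.toNat 0) b = pvQ 0 b := by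
  unfold pvRowGet
  by_cases hb : b = 0
  · rw [hb, pvQ_zero 0 (le_refl 0)]
    rfl
  · rw [pvQ, if_neg (by omega), if_pos (le_refl (0:Int)), if_neg hb]
    have h : b.toNat = (b.toNat - 1) + 1 := by omega
    rw [h, List.getElem?_cons_succ, List.getElem?_replicate]
    split_ifs <;> rfl

theorem pvB_eq (n k : Int) (h1 : 1 ≤ k) (h2 : k ≤ n) :
    NPeopleToKGroups_alt n k = pvQ k (n - k) := by
  unfold NPeopleToKGroups_alt
  rw [if_neg (by omega : ¬ (n < k ∨ k ≤ 0))]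
  have hinit : pvRowB (n - k) 1 1 (1 :: List.replicate (n - k).toNat 0) := by
    refine ⟨by rw [List.length_cons, List.length_replicate]; omega, ?_⟩
    intro b hb0 hbm
    rw [pvRowGet_initB (n - k) b hb0, if_neg (by omega : ¬ (1 ≤ b ∧ b < 1))]
    have e1 : (1 : Int) - 1 = 0 := by ring
    rw [e1]
  obtain ⟨-, hrow⟩ := pvOuterB (n - k) k (by omega) (k + 1 - 1).toNat 1 _ (by omega)
    (by omega) (by omega) hinit
  have hfin := hrow (n - k) (by omega) (le_refl _)
  rw [if_neg (by omega)] at hfin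
  have e : k + 1 - 1 = k := by ring
  rw [e] at hfin
  exact hfin

theorem pvA_zero (n : Int) (h : 0 ≤ n) : NPeopleToKGroups n 0 = 0 := by
  unfold NPeopleToKGroups
  rw [if_neg (by omega : ¬ n < 0)]
  show pvGet2 ((PySem.List.pyRange 1 (0+1) 1).foldl _ _) 0 n = 0
  rw [PySem.List.pyRange_one_eq_nil (show (0:Int) + 1 ≤ 1 by norm_num), List.foldl_nil]
  exact pvGet2_init n 0 0 n

-- ===== VERDICT (by name: the statement is the Claim_ definition above) =====
theorem NPeopleToKGroups_spec : Claim_equal_NPeopleToKGroups := by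
  intro n k _ hpre
  unfold Spec_NPeopleToKGroups
  by_cases h1 : n < k
  · unfold NPeopleToKGroups NPeopleToKGroups_alt
    rw [if_pos h1, if_pos (Or.inl h1)]
  · have hk : 0 ≤ k := by
      rcases hpre with h | h
      · exact absurd h h1
      · exact h
    by_cases h2 : k = 0
    · subst h2
      unfold NPeopleToKGroups_alt
      rw [if_pos (Or.inr (le_refl 0)), pvA_zero n (by omega)]
    · rw [pvA_eq n k (by omega) (by omega), pvB_eq n k (by omega) (by omega)]
      exact pvT_eq_pvQ_aux (k + n).toNat k n (by omega) (by omega) (le_refl _)
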